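-- pv_equiv track=rewrite | github.com/liskos/zadanie25osipov | variant_16/22.py | f
-- ===== SOURCE A (Python) =====
-- def f(x):
--     a = 0
--     b = 0
--     while x > 0:
--         a += 1
--         b += x % 8
--         x = x // 8
--     if a == 2 and b == 5:
--         return True
--     return False
-- ===== SOURCE B (Python) =====
-- def f(x):
--     return 8 <= x <= 63 and (x // 8 + x % 8) == 5
-- ===== Notes on version B (the rewrite author's own statement) =====
-- stated objective: simpler
-- what changed: Replaces the octal-digit-reading loop with a closed-form test: exactly two octal digits means 8 <= x <= 63, and then the digit sum is x//8 + x%8.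
import Mathlib
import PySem

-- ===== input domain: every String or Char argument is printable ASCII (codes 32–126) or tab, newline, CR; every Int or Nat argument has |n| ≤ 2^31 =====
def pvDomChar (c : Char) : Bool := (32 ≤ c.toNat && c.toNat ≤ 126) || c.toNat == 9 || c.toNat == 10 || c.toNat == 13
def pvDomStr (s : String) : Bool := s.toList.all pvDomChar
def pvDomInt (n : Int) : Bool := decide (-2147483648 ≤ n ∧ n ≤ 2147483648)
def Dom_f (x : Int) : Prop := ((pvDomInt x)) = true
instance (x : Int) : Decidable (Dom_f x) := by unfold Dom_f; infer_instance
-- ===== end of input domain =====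

-- B replaces A's octal-digit-reading loop with a closed-form range and digit-sum test (objective: simpler).


-- ===== PORT A =====
-- the while loop of A, carrying (x, a, b)
def fLoop (x a b : Int) : Int × Int :=
  if h : x > 0 then fLoop (PySem.Int.floordiv x 8) (a + 1) (b + PySem.Int.mod x 8) else (a, b)
termination_by x.toNat
decreasing_by
  have : PySem.Int.floordiv x 8 = x / 8 := PySem.Int.floordiv_eq_ediv_of_pos (by norm_num)
  rw [this]; omega

def f (x : Int) : Bool :=
  let r := fLoop x 0 0
  if r.1 = 2 ∧ r.2 = 5 then true else false

-- ===== PORT B =====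
def f_alt (x : Int) : Bool :=
  decide (8 ≤ x ∧ x ≤ 63) && decide (PySem.Int.floordiv x 8 + PySem.Int.mod x 8 = 5)

-- ===== PRECONDITION & SPEC =====
def Spec_f (x : Int) (out : Bool) : Prop := out = f_alt x
instance (x : Int) (out : Bool) : Decidable (Spec_f x out) := by unfold Spec_f; infer_instance

-- ===== CLAIM (what is proved, stated in full; the proofs are below) =====
def Claim_equal_f : Prop := ∀ (x : Int), Dom_f x → Spec_f x (f x)

-- ===== LEMMAS AND PROOFS =====
theorem fLoop_fst_ge (x a b : Int) : a ≤ (fLoop x a b).1 := by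
  fun_induction fLoop x a b with
  | case1 x a b h ih => omega
  | case2 x a b h => simp

theorem fLoop_stop (x a b : Int) (h : ¬ x > 0) : fLoop x a b = (a, b) := by
  rw [fLoop]; simp [h]

theorem fLoop_step (x a b : Int) (h : x > 0) :
    fLoop x a b = fLoop (x / 8) (a + 1) (b + x % 8) := by
  rw [fLoop]; simp [h]

-- ===== VERDICT (by name: the statement is the Claim_ definition above) =====
theorem f_spec : Claim_equal_f := by
  intro x _
  unfold Spec_f f f_alt
  by_cases h0 : x > 0
  · by_cases h8 : x < 8
    · -- one iteration
      rw [fLoop_step x 0 0 h0, fLoop_stop _ _ _ (by omega)]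
      have : x / 8 = 0 := by omega
      simp [this]
      omega
    · by_cases h64 : x ≤ 63
      · -- exactly two iterations
        rw [fLoop_step x 0 0 h0, fLoop_step _ _ _ (by omega),
            fLoop_stop _ _ _ (by omega)]
        have hq1 : x / 8 / 8 = 0 := by omega
        have hq2 : x / 8 % 8 = x / 8 := by omega
        rw [hq1, hq2] at *
        simp [show (8:Int) ≤ x by omega, h64]
        omega
      · -- at least three iterations
        rw [fLoop_step x 0 0 h0, fLoop_step _ _ _ (by omega),
            fLoop_step _ _ _ (by omega)]
        have hge := fLoop_fst_ge (x / 8 / 8 / 8) 3 (x % 8 + x / 8 % 8 + x / 8 / 8 % 8)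
        simp [show ¬ x ≤ 63 by omega]
        omega
  · rw [fLoop_stop _ _ _ h0]
    simp
    omega
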